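-- pv_equiv track=rewrite | github.com/stackwalnuts/walnut | plugins/alive/scripts/alive-p2p.py | is_top_level_bundle
-- ===== SOURCE A (Python) =====
-- STANDARD_CONTAINERS = {"bundles", "_core/_capsules"}
--
-- def is_top_level_bundle(bundle_relpath):
--     # type: (str) -> bool
--     """Return True if a POSIX relpath identifies a top-level bundle.
--
--     A bundle is "top-level" if its relpath is either a single path component
--     (v3 flat, e.g. ``shielding-review``) OR lives directly under a standard
--     container (``bundles/foo`` or ``_core/_capsules/foo``). Bundles buried in
--     arbitrary intermediate dirs (e.g. ``archive/old/bundle-a``) are NOT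
--     shareable via P2P and return False.
--
--     The function is defensive about input: OS-native backslashes are converted
--     to forward slashes before the check, so a caller that forgot to normalize
--     still gets the right answer.
--     """
--     if not bundle_relpath:
--         return False
--     relpath = bundle_relpath.replace("\\", "/")
--     if "/" not in relpath:
--         return True
--     for container in STANDARD_CONTAINERS:
--         prefix = container + "/"
--         if relpath.startswith(prefix):
--             remainder = relpath[len(prefix):]
--             if "/" not in remainder:
--                 return True
--     return False
-- ===== SOURCE B (Python) =====
-- STANDARD_CONTAINERS = {"bundles", "_core/_capsules"}
--
-- def is_top_level_bundle(bundle_relpath):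
--     # type: (str) -> bool
--     if not bundle_relpath:
--         return False
--     relpath = bundle_relpath.replace("\\", "/")
--     if "/" not in relpath:
--         return True
--     return relpath.rsplit("/", 1)[0] in STANDARD_CONTAINERS
-- ===== Notes on version B (the rewrite author's own statement) =====
-- stated objective: simpler
-- what changed: B drops A's per-container prefix-scan loop with its startswith/remainder-slash branches and instead computes the parent directory once via rsplit('/', 1)[0] followed by a single set membership test.
import Mathlib
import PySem

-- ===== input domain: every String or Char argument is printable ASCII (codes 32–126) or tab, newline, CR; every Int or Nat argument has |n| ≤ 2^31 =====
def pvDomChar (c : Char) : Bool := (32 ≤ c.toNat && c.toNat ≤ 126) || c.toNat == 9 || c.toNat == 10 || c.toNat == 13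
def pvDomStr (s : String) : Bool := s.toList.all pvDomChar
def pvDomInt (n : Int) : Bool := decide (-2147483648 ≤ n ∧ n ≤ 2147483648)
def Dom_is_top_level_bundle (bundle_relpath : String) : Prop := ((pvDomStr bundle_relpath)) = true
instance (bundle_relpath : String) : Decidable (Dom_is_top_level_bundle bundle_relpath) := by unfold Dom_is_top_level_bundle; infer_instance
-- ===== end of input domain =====

-- B replaces A's per-container prefix-scan loop by one rsplit("/",1)[0] (parent directory) plus a single membership test (objective: simpler).

-- ===== PORT A =====
-- STANDARD_CONTAINERS, a module-level Python set shared by A and B (two elements, iteration order immaterial: at most one can prefix-match)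
def pvContainers : List (List Char) := ["bundles".toList, "_core/_capsules".toList]

def is_top_level_bundle (bundle_relpath : String) : Bool :=
  if bundle_relpath.toList.isEmpty then false
  else
    let relpath := PySem.Chars.replace bundle_relpath.toList ['\\'] ['/']
    if !(PySem.Chars.isIn ['/'] relpath) then true
    else
      pvContainers.any (fun container =>
        let pre := container ++ ['/']
        PySem.Chars.startswith relpath pre &&
          !(PySem.Chars.isIn ['/'] (PySem.Chars.slice relpath (some (pre.length : Int)) none)))

-- ===== PORT B =====
def is_top_level_bundle_alt (bundle_relpath : String) : Bool :=
  if bundle_relpath.toList.isEmpty then false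
  else
    let relpath := PySem.Chars.replace bundle_relpath.toList ['\\'] ['/']
    if PySem.Chars.isIn ['/'] relpath then
      -- hand port of relpath.rsplit("/", 1)[0] (PySem has no rsplit); exact here because '/' occurs in relpath
      let parent := ((relpath.reverse.dropWhile (· != '/')).tail).reverse
      pvContainers.contains parent
    else true

-- ===== PRECONDITION & SPEC =====
def Spec_is_top_level_bundle (bundle_relpath : String) (out : Bool) : Prop := out = is_top_level_bundle_alt bundle_relpath
instance (bundle_relpath : String) (out : Bool) : Decidable (Spec_is_top_level_bundle bundle_relpath out) := by unfold Spec_is_top_level_bundle; infer_instance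

-- ===== CLAIM (what is proved, stated in full; the proofs are below) =====
def Claim_equal_is_top_level_bundle : Prop := ∀ (bundle_relpath : String), Dom_is_top_level_bundle bundle_relpath → Spec_is_top_level_bundle bundle_relpath (is_top_level_bundle bundle_relpath)

-- ===== LEMMAS AND PROOFS =====

lemma pv_singleton_infix {a : Char} {l : List Char} : [a] <:+: l ↔ a ∈ l := by
  constructor
  · rintro ⟨s, t, rfl⟩; simp
  · intro h
    obtain ⟨s, t, rfl⟩ := List.append_of_mem h
    exact ⟨s, t, by simp⟩

-- the rsplit computation recovers the part before the LAST slash of any no-slash-tail decomposition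
lemma pv_parent_of_decomp (p r : List Char) (hr : '/' ∉ r) :
    (((p ++ '/' :: r).reverse.dropWhile (· != '/')).tail).reverse = p := by
  have h1 : (p ++ '/' :: r).reverse = r.reverse ++ '/' :: p.reverse := by simp
  have h2 : (r.reverse).dropWhile (· != '/') = [] := by
    rw [List.dropWhile_eq_nil_iff]
    intro x hx
    simp only [bne_iff_ne, ne_eq]
    intro hxe
    exact hr (by simpa [hxe] using List.mem_reverse.mp hx)
  rw [h1, List.dropWhile_append, h2]
  simp [List.dropWhile]

lemma pv_decomp (l : List Char) (h : '/' ∈ l) :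
    ∃ p r, l = p ++ '/' :: r ∧ '/' ∉ r := by
  induction l with
  | nil => cases h
  | cons x xs ih =>
    by_cases hx : '/' ∈ xs
    · obtain ⟨p, r, heq, hr⟩ := ih hx
      exact ⟨x :: p, r, by simp [heq], hr⟩
    · have hxeq : x = '/' := by
        rcases List.mem_cons.mp h with h1 | h2
        · exact h1.symm
        · exact absurd h2 hx
      exact ⟨[], xs, by simp [hxeq], hx⟩

-- A's per-container check succeeds exactly when the container IS the parent directory
lemma pv_check_iff (c p r : List Char) (hr : '/' ∉ r) :
    (PySem.Chars.startswith (p ++ '/' :: r) (c ++ ['/']) &&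
      !(PySem.Chars.isIn ['/'] (PySem.Chars.slice (p ++ '/' :: r) (some (((c ++ ['/']).length : Nat) : Int)) none))) = true
    ↔ p = c := by
  have hslice : ∀ t : List Char,
      PySem.Chars.slice ((c ++ ['/']) ++ t) (some (((c ++ ['/']).length : Nat) : Int)) none = t := by
    intro t
    rw [PySem.Chars.slice_eq_listSlice, PySem.List.slice_from_natCast]
    simp
  constructor
  · rintro h
    rw [Bool.and_eq_true, Bool.not_eq_true', PySem.Chars.startswith_iff] at h
    obtain ⟨⟨t, ht⟩, hno⟩ := h
    have hl : p ++ '/' :: r = (c ++ ['/']) ++ t := ht.symm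
    rw [hl, hslice t, PySem.Chars.isIn_eq_false_iff, pv_singleton_infix] at hno
    have h1 := pv_parent_of_decomp p r hr
    have h2 := pv_parent_of_decomp c t hno
    rw [hl] at h1
    have : (c ++ ['/']) ++ t = c ++ '/' :: t := by simp
    rw [this] at h1
    rw [h1] at h2
    exact h2
  · rintro rfl
    rw [Bool.and_eq_true, Bool.not_eq_true', PySem.Chars.startswith_iff]
    have hl : p ++ '/' :: r = (p ++ ['/']) ++ r := by simp
    constructor
    · exact ⟨r, by simp⟩
    · rw [hl, hslice r, PySem.Chars.isIn_eq_false_iff, pv_singleton_infix]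
      exact hr

-- ===== VERDICT (by name: the statement is the Claim_ definition above) =====
theorem is_top_level_bundle_spec : Claim_equal_is_top_level_bundle := by
  intro s _
  unfold Spec_is_top_level_bundle is_top_level_bundle is_top_level_bundle_alt
  by_cases he : s.toList.isEmpty
  · simp [he]
  · simp only [he, if_false, Bool.false_eq_true]
    set l := PySem.Chars.replace s.toList ['\\'] ['/'] with hl
    by_cases hin : PySem.Chars.isIn ['/'] l = true
    · rw [if_neg (by simp [hin]), if_pos hin]
      have hmem : '/' ∈ l := by
        by_contra hmem
        have hfalse : PySem.Chars.isIn ['/'] l = false := by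
          rw [PySem.Chars.isIn_eq_false_iff]
          exact fun hinf => hmem (pv_singleton_infix.mp hinf)
        rw [hfalse] at hin
        exact Bool.false_ne_true hin
      obtain ⟨p, r, heq, hr⟩ := pv_decomp l hmem
      have hparent : ((l.reverse.dropWhile (· != '/')).tail).reverse = p := by
        rw [heq]; exact pv_parent_of_decomp p r hr
      rw [hparent]
      have hA : ∀ c : List Char,
          (PySem.Chars.startswith l (c ++ ['/']) &&
            !(PySem.Chars.isIn ['/'] (PySem.Chars.slice l (some (((c ++ ['/']).length : Nat) : Int)) none))) = true
          ↔ p = c := by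
        intro c; rw [heq]; exact pv_check_iff c p r hr
      simp only [pvContainers, List.any_cons, List.any_nil, List.contains_cons,
        List.contains_nil, Bool.or_false]
      rw [Bool.eq_iff_iff]
      simp only [Bool.or_eq_true, beq_iff_eq]
      constructor
      · rintro (h | h)
        · exact Or.inl ((hA _).mp h)
        · exact Or.inr ((hA _).mp h)
      · rintro (h | h)
        · exact Or.inl ((hA _).mpr h)
        · exact Or.inr ((hA _).mpr h)
    · have hin' : PySem.Chars.isIn ['/'] l = false := by
        cases h : PySem.Chars.isIn ['/'] l
        · rfl
        · exact absurd h hin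
      rw [if_pos (by simp [hin']), if_neg (by simp [hin'])]
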